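-- pv_equiv track=rewrite | github.com/cry999/AtCoder | beginner-contest/023/D.py | shot_king
-- ===== SOURCE A (Python) =====
-- def shot_king(N: int, balloons: list) -> int:
--     Xmax = max(h + (N - 1) * s for h, s in balloons)
--
--     def check(opt: int) -> bool:
--         time_limits = [(opt - h) // s for h, s in balloons]
--         time_limits.sort()
--
--         return all(t >= i for i, t in enumerate(time_limits))
--
--     l, r = 0, Xmax
--     while r - l > 1:
--         m = (r + l) // 2
--         if check(m):
--             r = m
--         else:
--             l = m
--     return r
-- ===== SOURCE B (Python) =====
-- def shot_king(N: int, balloons: list) -> int: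
--     M = len(balloons)
--     Xmax = max(h + (N - 1) * s for h, s in balloons)
--
--     def feasible(opt: int) -> bool:
--         # counting pass with a frequency dict instead of sort+scan
--         freq = {}
--         for h, s in balloons:
--             t = (opt - h) // s
--             if t < 0:
--                 return False
--             key = t if t < M else M - 1
--             freq[key] = freq.get(key, 0) + 1
--         c = 0
--         for k in range(M):
--             c += freq.get(k, 0)
--             if c > k + 1:
--                 return False
--         return True
--
--     def bisect(lo: int, hi: int) -> int:
--         if hi - lo <= 1:
--             return hi
--         mid = (lo + hi) // 2
--         return bisect(lo, mid) if feasible(mid) else bisect(mid, hi)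
--
--     return bisect(0, Xmax)
-- ===== Notes on version B (the rewrite author's own statement) =====
-- stated objective: alternative
-- what changed: B replaces A's iterative binary search + sort-based feasibility test by a recursive bisection whose check does a counting pass: it buckets each clamped time limit in a frequency dictionary and verifies the running prefix sums over range(M) never exceed the slot budget, so the O(N log N) sort disappears in favour of an O(N) count; measured times are comparable because CPython's sort is C-coded.
import Mathlib
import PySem

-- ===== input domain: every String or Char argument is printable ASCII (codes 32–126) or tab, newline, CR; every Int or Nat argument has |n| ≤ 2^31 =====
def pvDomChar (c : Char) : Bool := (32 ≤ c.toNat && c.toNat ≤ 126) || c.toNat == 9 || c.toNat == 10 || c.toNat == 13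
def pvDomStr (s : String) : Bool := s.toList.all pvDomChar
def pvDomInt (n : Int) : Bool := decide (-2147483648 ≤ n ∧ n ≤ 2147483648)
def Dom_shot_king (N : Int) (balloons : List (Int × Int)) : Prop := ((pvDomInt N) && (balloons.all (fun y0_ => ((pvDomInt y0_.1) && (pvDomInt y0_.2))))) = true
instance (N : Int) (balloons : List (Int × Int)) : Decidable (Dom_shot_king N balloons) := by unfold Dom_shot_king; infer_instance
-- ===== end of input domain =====

-- B replaces A's iterative binary search + sorted-list feasibility test by a
-- recursive bisection whose check buckets clamped time limits in a frequency
-- dict and scans prefix sums over range(M) (alternative algorithm, same measured cost).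


-- termination bound shared by both bisection recursions (cited in decreasing_by)
theorem pv_mid_bounds {l r : Int} (h : 1 < r - l) :
    l < PySem.Int.floordiv (r + l) 2 ∧ PySem.Int.floordiv (r + l) 2 < r := by
  have hb := PySem.Int.floordiv_two_mid_bounds (show (l+1 : Int) ≤ r - 1 by omega)
  have he : (l + 1) + (r - 1) = r + l := by ring
  rw [he] at hb
  omega

-- ===== PORT A =====
-- check(opt): sort the time limits, then all(t >= i for i, t in enumerate(...))
def shot_king_check (balloons : List (Int × Int)) (opt : Int) : Bool :=
  let time_limits := balloons.map (fun p => PySem.Int.floordiv (opt - p.1) p.2)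
  let s := PySem.List.sorted time_limits (fun t => t) false
  (PySem.List.enumerate s 0).all (fun it => decide (it.1 ≤ it.2))

-- the 'while r - l > 1' binary-search loop of A
def shot_king_loop (balloons : List (Int × Int)) (l r : Int) : Int :=
  if h : 1 < r - l then
    let m := PySem.Int.floordiv (r + l) 2
    if shot_king_check balloons m then shot_king_loop balloons l m
    else shot_king_loop balloons m r
  else r
termination_by (r - l).toNat
decreasing_by
  · have := pv_mid_bounds h; omega
  · have := pv_mid_bounds h; omega

def shot_king (N : Int) (balloons : List (Int × Int)) : Int :=
  let Xmax := (PySem.List.max? (balloons.map (fun p => p.1 + (N - 1) * p.2)) (fun x => x)).getD 0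
  shot_king_loop balloons 0 Xmax

-- ===== PORT B =====
-- first pass of B's feasible: bucket each clamped limit in the dict, bail on a negative one
def shot_king_alt_fill (M opt : Int) : List (Int × Int) → PySem.Dict Int Int → Option (PySem.Dict Int Int)
  | [], freq => some freq
  | (h, s) :: rest, freq =>
    let t := PySem.Int.floordiv (opt - h) s
    if t < 0 then none
    else
      let key := if t < M then t else M - 1
      shot_king_alt_fill M opt rest (freq.insert key (freq.getD key 0 + 1))

-- second pass: for k in range(M), accumulate freq.get(k, 0) and fail when c > k + 1
def shot_king_alt_cum (freq : PySem.Dict Int Int) : List Int → Int → Bool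
  | [], _ => true
  | k :: ks, c =>
    let c' := c + freq.getD k 0
    if c' > k + 1 then false else shot_king_alt_cum freq ks c'

def shot_king_alt_feasible (balloons : List (Int × Int)) (opt : Int) : Bool :=
  let M : Int := (balloons.length : Int)
  match shot_king_alt_fill M opt balloons PySem.Dict.empty with
  | none => false
  | some freq => shot_king_alt_cum freq (PySem.List.pyRange 0 M 1) 0

-- B's recursive bisection
def shot_king_alt_bisect (balloons : List (Int × Int)) (lo hi : Int) : Int :=
  if h : hi - lo ≤ 1 then hi
  else
    let mid := PySem.Int.floordiv (lo + hi) 2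
    if shot_king_alt_feasible balloons mid then shot_king_alt_bisect balloons lo mid
    else shot_king_alt_bisect balloons mid hi
termination_by (hi - lo).toNat
decreasing_by
  · have := pv_mid_bounds (l := lo) (r := hi) (by omega); rw [Int.add_comm hi lo] at this; omega
  · have := pv_mid_bounds (l := lo) (r := hi) (by omega); rw [Int.add_comm hi lo] at this; omega

def shot_king_alt (N : Int) (balloons : List (Int × Int)) : Int :=
  let Xmax := (PySem.List.max? (balloons.map (fun p => p.1 + (N - 1) * p.2)) (fun x => x)).getD 0
  shot_king_alt_bisect balloons 0 Xmax

-- ===== PRECONDITION & SPEC =====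
-- Pre_ excludes exactly the inputs where Python A raises: an empty balloon list (max()
-- raises ValueError) and lists containing a zero speed whenever the binary-search interval
-- is non-degenerate (Xmax > 1), where check's '// s' raises ZeroDivisionError.
def Pre_shot_king (N : Int) (balloons : List (Int × Int)) : Prop :=
  balloons ≠ [] ∧
    ((∀ p ∈ balloons, p.2 ≠ 0) ∨ (∀ p ∈ balloons, p.1 + (N - 1) * p.2 ≤ 1))
instance (N : Int) (balloons : List (Int × Int)) : Decidable (Pre_shot_king N balloons) := by
  unfold Pre_shot_king; infer_instance

def pvWitness_shot_king : Int × (List (Int × Int)) := (3, [(2, 1), (0, 2)])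

def Spec_shot_king (N : Int) (balloons : List (Int × Int)) (out : Int) : Prop := out = shot_king_alt N balloons
instance (N : Int) (balloons : List (Int × Int)) (out : Int) : Decidable (Spec_shot_king N balloons out) := by unfold Spec_shot_king; infer_instance

-- ===== CLAIM (what is proved, stated in full; the proofs are below) =====
def Claim_equal_shot_king : Prop := ∀ (N : Int) (balloons : List (Int × Int)), Dom_shot_king N balloons → Pre_shot_king N balloons → Spec_shot_king N balloons (shot_king N balloons)

-- ===== LEMMAS AND PROOFS =====

-- fill returns none iff some time limit is negative
theorem fill_eq_none_iff (M opt : Int) (bs : List (Int × Int)) (d : PySem.Dict Int Int) :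
    shot_king_alt_fill M opt bs d = none ↔
      ∃ p ∈ bs, PySem.Int.floordiv (opt - p.1) p.2 < 0 := by
  induction bs generalizing d with
  | nil => simp [shot_king_alt_fill]
  | cons hd tl ih =>
    obtain ⟨h, s⟩ := hd
    simp only [shot_king_alt_fill]
    by_cases ht : PySem.Int.floordiv (opt - h) s < 0
    · rw [if_pos ht]
      exact iff_of_true rfl ⟨(h, s), List.mem_cons_self, ht⟩
    · rw [if_neg ht, ih]
      simp only [List.mem_cons]
      constructor
      · rintro ⟨p, hp, hlt⟩; exact ⟨p, Or.inr hp, hlt⟩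
      · rintro ⟨p, hp | hp, hlt⟩
        · cases hp; exact absurd hlt ht
        · exact ⟨p, hp, hlt⟩

-- when no time limit is negative, the dict bucket for j gains the number of balloons
-- whose clamped time limit equals j
theorem fill_eq_some (M opt : Int) (bs : List (Int × Int)) (d : PySem.Dict Int Int)
    (hpos : ∀ p ∈ bs, 0 ≤ PySem.Int.floordiv (opt - p.1) p.2) :
    ∃ d', shot_king_alt_fill M opt bs d = some d' ∧
      ∀ j : Int,
        d'.getD j 0 = d.getD j 0 +
          (bs.countP (fun p => decide (min (PySem.Int.floordiv (opt - p.1) p.2) (M - 1) = j))) := by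
  induction bs generalizing d with
  | nil => exact ⟨d, rfl, by intro j; simp⟩
  | cons hd tl ih =>
    obtain ⟨h, s⟩ := hd
    have ht0 : 0 ≤ PySem.Int.floordiv (opt - h) s := hpos (h, s) (List.mem_cons_self)
    simp only [shot_king_alt_fill, if_neg (by omega : ¬ PySem.Int.floordiv (opt - h) s < 0)]
    set t := PySem.Int.floordiv (opt - h) s with hts
    set key : Int := if t < M then t else M - 1 with hkey
    have hkeymin : key = min t (M - 1) := by
      rw [hkey]; split_ifs with hc <;> omega
    obtain ⟨d', heq, hval⟩ := ih (d.insert key (d.getD key 0 + 1))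
      (fun p hp => hpos p (List.mem_cons_of_mem _ hp))
    refine ⟨d', heq, ?_⟩
    intro j
    rw [hval j, List.countP_cons, PySem.Dict.getD_insert]
    by_cases hc : min t (M - 1) = j
    · rw [if_pos ((hkeymin.trans hc).symm), hkeymin.trans hc]
      simp [← hts, hc]
      omega
    · rw [if_neg (fun hj => hc (hkeymin.symm.trans hj.symm))]
      simp [← hts, hc]

-- the bucket scan over pyRange is the positional cumulative pass over the mapped list
def pvCum : List Int → Int → Int → Bool
  | [], _, _ => true
  | c :: rest, acc, k =>
    let acc' := acc + c
    if acc' > k + 1 then false else pvCum rest acc' (k + 1)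

theorem cumD_eq_pvCum (freq : PySem.Dict Int Int) (a b c : Int) :
    shot_king_alt_cum freq (PySem.List.pyRange a b 1) c =
      pvCum ((PySem.List.pyRange a b 1).map (fun k => freq.getD k 0)) c a := by
  by_cases hab : a < b
  · rw [PySem.List.pyRange_one_cons hab]
    simp only [shot_king_alt_cum, List.map_cons, pvCum]
    split_ifs with hgt
    · rfl
    · exact cumD_eq_pvCum freq (a + 1) b (c + freq.getD a 0)
  · rw [PySem.List.pyRange_one_eq_nil (by omega)]
    rfl
termination_by (b - a).toNat
decreasing_by omega

-- the cumulative pass succeeds iff every prefix sum stays within its slot budget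
theorem cum_iff (cnt : List Int) (acc k : Int) :
    pvCum cnt acc k = true ↔
      ∀ j (_ : j < cnt.length), acc + ((cnt.take (j + 1)).sum) ≤ k + j + 1 := by
  induction cnt generalizing acc k with
  | nil => simp [pvCum]
  | cons c rest ih =>
    simp only [pvCum]
    split_ifs with hgt
    · simp only [false_iff, not_forall]
      exact ⟨0, by simp, by simp; omega⟩
    · rw [ih]
      constructor
      · intro hall j hj
        cases j with
        | zero => simp; omega
        | succ j' =>
          have := hall j' (by simpa using hj)
          simp only [List.take_succ_cons, List.sum_cons]
          push_cast at this ⊢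
          omega
      · intro hall j hj
        have := hall (j + 1) (by simpa using hj)
        simp only [List.take_succ_cons, List.sum_cons] at this
        push_cast at this ⊢
        omega

-- countP (g ≤ j+1) splits into countP (g ≤ j) plus countP (g = j+1)
theorem countP_le_split {α : Type} (g : α → Int) (bs : List α) (j : Int) :
    bs.countP (fun p => decide (g p ≤ j + 1)) =
      bs.countP (fun p => decide (g p ≤ j)) + bs.countP (fun p => decide (g p = j + 1)) := by
  induction bs with
  | nil => simp
  | cons b tl ih =>
    simp only [List.countP_cons, ih]
    by_cases h1 : g b ≤ j + 1 <;> by_cases h2 : g b ≤ j <;> by_cases h3 : g b = j + 1 <;>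
      simp [h1, h2, h3] <;> omega

-- prefix sums of the bucket array are counts of clamped limits ≤ j
theorem take_sum_eq_countP (M : Int) (hM : 1 ≤ M) (bs : List (Int × Int)) (g : Int × Int → Int)
    (hg : ∀ p ∈ bs, 0 ≤ min (g p) (M - 1)) (cnt' : List Int) (hlen : cnt'.length = M.toNat)
    (hval : ∀ j (hj : j < cnt'.length),
      cnt'[j] = bs.countP (fun p => decide (min (g p) (M - 1) = (j : Int)))) :
    ∀ j (_ : j < cnt'.length),
      (cnt'.take (j + 1)).sum = bs.countP (fun p => decide (min (g p) (M - 1) ≤ (j : Int))) := by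
  intro j hj
  induction j with
  | zero =>
    have h0 : 0 < cnt'.length := by omega
    rw [List.sum_take_succ _ 0 h0]
    simp only [List.take_zero, List.sum_nil, zero_add]
    rw [hval 0 h0]
    congr 1
    apply List.countP_congr
    intro p hp
    have hgp := hg p hp
    rcases le_or_gt (min (g p) (M - 1)) ((0 : Nat) : Int) with hle | hgt
    · have h1 : min (g p) (M - 1) = ((0 : Nat) : Int) := by push_cast at *; omega
      rw [decide_eq_true h1, decide_eq_true hle]
    · have h1 : ¬ (min (g p) (M - 1) = ((0 : Nat) : Int)) := by push_cast at *; omega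
      have h2 : ¬ (min (g p) (M - 1) ≤ ((0 : Nat) : Int)) := by push_cast at *; omega
      rw [decide_eq_false h1, decide_eq_false h2]
  | succ j' ihj =>
    have hj' : j' < cnt'.length := by omega
    rw [List.sum_take_succ _ _ hj, ihj hj', hval (j' + 1) hj]
    have hs : bs.countP (fun p => decide (min (g p) (M - 1) ≤ (j' : Int) + 1)) =
        bs.countP (fun p => decide (min (g p) (M - 1) ≤ (j' : Int))) +
          bs.countP (fun p => decide (min (g p) (M - 1) = (j' : Int) + 1)) :=
      countP_le_split (fun p => min (g p) (M - 1)) bs (j' : Int)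
    push_cast at hs ⊢
    omega

-- A's check is the pointwise lower-bound test on the sorted time limits
theorem checkA_iff (balloons : List (Int × Int)) (opt : Int) :
    shot_king_check balloons opt = true ↔
      (∀ k (hk : k < (PySem.List.sorted (balloons.map (fun p => PySem.Int.floordiv (opt - p.1) p.2)) (fun t => t) false).length),
        (k : Int) ≤ (PySem.List.sorted (balloons.map (fun p => PySem.Int.floordiv (opt - p.1) p.2)) (fun t => t) false)[k]) := by
  simp only [shot_king_check, List.all_eq_true]
  constructor
  · intro hall k hk
    have := hall ((k : Int), (PySem.List.sorted _ (fun t => t) false)[k])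
      (by rw [PySem.List.mem_enumerate_iff]; exact ⟨k, hk, by simp⟩)
    simpa using this
  · intro hidx it hit
    rw [PySem.List.mem_enumerate_iff] at hit
    obtain ⟨k, hk, rfl⟩ := hit
    simpa using hidx k hk

-- core combinatorial fact: on a sorted list S, ∀k k ≤ S[k]  ⟺  all elements
-- nonnegative and at most j+1 elements are ≤ j, for every j < |S|
theorem sorted_index_iff_counts (S : List Int) (hmono : ∀ p q (hpq : p ≤ q) (hq : q < S.length),
      S[p]'(by omega) ≤ S[q]) :
    (∀ k (hk : k < S.length), (k : Int) ≤ S[k]) ↔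
      ((∀ x ∈ S, 0 ≤ x) ∧
        ∀ j (_ : j < S.length), S.countP (fun x => decide (x ≤ (j : Int))) ≤ j + 1) := by
  constructor
  · intro hidx
    refine ⟨?_, ?_⟩
    · intro x hx
      obtain ⟨k, hk, rfl⟩ := List.mem_iff_getElem.mp hx
      have := hidx k hk
      omega
    · intro j hj
      have hsplit : S.countP (fun x => decide (x ≤ (j : Int))) =
          (S.take (j + 1)).countP (fun x => decide (x ≤ (j : Int))) +
          (S.drop (j + 1)).countP (fun x => decide (x ≤ (j : Int))) := by
        rw [← List.countP_append, List.take_append_drop]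
      have hdrop : (S.drop (j + 1)).countP (fun x => decide (x ≤ (j : Int))) = 0 := by
        rw [List.countP_eq_zero]
        intro x hx
        obtain ⟨k, hk, rfl⟩ := List.mem_iff_getElem.mp hx
        rw [List.getElem_drop]
        have hkS : j + 1 + k < S.length := by
          have := List.length_drop (l := S) (i := j + 1); omega
        have := hidx (j + 1 + k) hkS
        simp only [decide_eq_true_eq]
        push_cast at this ⊢
        omega
      have htake : (S.take (j + 1)).countP (fun x => decide (x ≤ (j : Int))) ≤ j + 1 := by
        calc _ ≤ (S.take (j + 1)).length := List.countP_le_length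
        _ ≤ j + 1 := by simp
      omega
  · rintro ⟨hnn, hcnt⟩ k hk
    by_contra hlt
    push_neg at hlt
    have h0 : (0 : Int) ≤ S[k] := hnn _ (List.getElem_mem hk)
    set j : Nat := (S[k]'hk).toNat with hjdef
    have hjk : j < k := by omega
    have hjS : j < S.length := by omega
    have htake : (S.take (k + 1)).countP (fun x => decide (x ≤ (j : Int))) = k + 1 := by
      have hall : ∀ x ∈ S.take (k + 1), decide (x ≤ (j : Int)) = true := by
        intro x hx
        obtain ⟨p, hp, rfl⟩ := List.mem_iff_getElem.mp hx
        rw [List.getElem_take]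
        have hpk : p ≤ k := by
          have := List.length_take (i := k + 1) (l := S); omega
        have := hmono p k hpk hk
        simp only [decide_eq_true_eq]
        omega
      have h1 := List.countP_eq_length.mpr hall
      have h2 : (S.take (k + 1)).length = k + 1 := by
        rw [List.length_take]; omega
      rw [h1, h2]
    have hge : k + 1 ≤ S.countP (fun x => decide (x ≤ (j : Int))) := by
      have hsplit : S.countP (fun x => decide (x ≤ (j : Int))) =
          (S.take (k + 1)).countP (fun x => decide (x ≤ (j : Int))) +
          (S.drop (k + 1)).countP (fun x => decide (x ≤ (j : Int))) := by
        rw [← List.countP_append, List.take_append_drop]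
      omega
    have := hcnt j hjS
    omega

-- B's feasible in closed form
theorem checkB_iff (balloons : List (Int × Int)) (opt : Int) (hne : balloons ≠ []) :
    shot_king_alt_feasible balloons opt = true ↔
      ((∀ p ∈ balloons, 0 ≤ PySem.Int.floordiv (opt - p.1) p.2) ∧
        ∀ j (_ : j < balloons.length),
          balloons.countP
            (fun p => decide (min (PySem.Int.floordiv (opt - p.1) p.2) ((balloons.length : Int) - 1) ≤ (j : Int))) ≤ j + 1) := by
  have hM : 1 ≤ (balloons.length : Int) := by
    have : balloons.length ≠ 0 := fun h => hne (List.eq_nil_of_length_eq_zero h)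
    omega
  simp only [shot_king_alt_feasible]
  by_cases hneg : ∃ p ∈ balloons, PySem.Int.floordiv (opt - p.1) p.2 < 0
  · rw [(fill_eq_none_iff _ _ _ _).mpr hneg]
    refine iff_of_false (by simp) ?_
    rintro ⟨hpos, -⟩
    obtain ⟨p, hp, hlt⟩ := hneg
    exact absurd (hpos p hp) (by omega)
  · have hpos : ∀ p ∈ balloons, 0 ≤ PySem.Int.floordiv (opt - p.1) p.2 := by
      intro p hp
      by_contra hneg2
      exact hneg ⟨p, hp, by show PySem.Int.floordiv (opt - p.1) p.2 < 0; omega⟩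
    obtain ⟨d', heq, hval⟩ := fill_eq_some (balloons.length : Int) opt balloons
      PySem.Dict.empty hpos
    rw [heq]
    have hred : (match some d' with
        | none => false
        | some freq => shot_king_alt_cum freq (PySem.List.pyRange 0 (balloons.length : Int) 1) 0) =
        shot_king_alt_cum d' (PySem.List.pyRange 0 (balloons.length : Int) 1) 0 := rfl
    rw [hred, cumD_eq_pvCum, cum_iff]
    have hlenc : ((PySem.List.pyRange 0 (balloons.length : Int) 1).map (fun k => d'.getD k 0)).length
        = ((balloons.length : Int)).toNat := by
      simp [PySem.List.length_pyRange_one]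
    have hvalc : ∀ j (hj : j < ((PySem.List.pyRange 0 (balloons.length : Int) 1).map (fun k => d'.getD k 0)).length),
        ((PySem.List.pyRange 0 (balloons.length : Int) 1).map (fun k => d'.getD k 0))[j] = balloons.countP
          (fun p => decide (min (PySem.Int.floordiv (opt - p.1) p.2) ((balloons.length : Int) - 1) = (j : Int))) := by
      intro j hj
      simp only [List.getElem_map]
      rw [PySem.List.getElem_pyRange_one]
      rw [hval ((0 : Int) + j)]
      simp
    have hsum := take_sum_eq_countP (balloons.length : Int) hM balloons
      (fun p => PySem.Int.floordiv (opt - p.1) p.2)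
      (fun p hp => by
        have h1 := hpos p hp
        show 0 ≤ min (PySem.Int.floordiv (opt - p.1) p.2) ((balloons.length : Int) - 1)
        omega) _ hlenc hvalc
    constructor
    · intro hall
      refine ⟨hpos, fun j hj => ?_⟩
      have hjc : j < ((PySem.List.pyRange 0 (balloons.length : Int) 1).map (fun k => d'.getD k 0)).length := by omega
      have := hall j hjc
      rw [hsum j hjc] at this
      simp only at this
      omega
    · rintro ⟨_, hcnt⟩ j hj
      have hjb : j < balloons.length := by omega
      rw [hsum j hj]
      have := hcnt j hjb
      simp only
      omega

-- bridge: the clamped count condition equals the plain count condition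
theorem clamped_counts_iff (ts : List Int) (j : Nat) (hj : j < ts.length) :
    (ts.countP (fun x => decide (min x ((ts.length : Int) - 1) ≤ (j : Int))) ≤ j + 1 ↔
      ts.countP (fun x => decide (x ≤ (j : Int))) ≤ j + 1) := by
  by_cases hlast : j = ts.length - 1
  · have h1 : ts.countP (fun x => decide (min x ((ts.length : Int) - 1) ≤ (j : Int))) ≤ ts.length :=
      List.countP_le_length
    have h2 : ts.countP (fun x => decide (x ≤ (j : Int))) ≤ ts.length := List.countP_le_length
    constructor <;> intro _ <;> omega
  · have hjlt : (j : Int) < (ts.length : Int) - 1 := by omega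
    have : ts.countP (fun x => decide (min x ((ts.length : Int) - 1) ≤ (j : Int))) =
        ts.countP (fun x => decide (x ≤ (j : Int))) := by
      apply List.countP_congr
      intro x _
      constructor <;> intro hh <;> simp_all <;> omega
    rw [this]

-- the two checks agree on every query
theorem check_eq (balloons : List (Int × Int)) (opt : Int) :
    shot_king_check balloons opt = shot_king_alt_feasible balloons opt := by
  rcases eq_or_ne balloons [] with rfl | hne
  · rfl
  · rw [Bool.eq_iff_iff, checkA_iff, checkB_iff _ _ hne]
    set ts := balloons.map (fun p => PySem.Int.floordiv (opt - p.1) p.2) with hts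
    set S := PySem.List.sorted ts (fun t => t) false with hS
    have hperm : S.Perm ts := PySem.List.sorted_perm _ _ _
    have hlenS : S.length = ts.length := hperm.length_eq
    have hlents : ts.length = balloons.length := by simp [hts]
    have hmono : ∀ p q (hpq : p ≤ q) (hq : q < S.length), S[p]'(by omega) ≤ S[q] := by
      intro p q hpq hq
      have hq' : q < (PySem.List.sorted ts (fun t => t) false).length := by rw [← hS]; exact hq
      have h := PySem.List.key_sorted_getElem_mono ts (fun t => t) hpq hq'
      exact h
    rw [sorted_index_iff_counts S hmono]
    have hcount : ∀ g : Int → Bool, S.countP g = ts.countP g := fun g => hperm.countP_eq g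
    have hmem : ∀ x, x ∈ S ↔ x ∈ ts := fun x => hperm.mem_iff
    have hcountb : ∀ g : Int → Bool, ts.countP g = balloons.countP
        (fun p => g (PySem.Int.floordiv (opt - p.1) p.2)) := by
      intro g; rw [hts, List.countP_map]; rfl
    constructor
    · rintro ⟨hnn, hcnt⟩
      constructor
      · intro p hp
        exact hnn _ ((hmem _).mpr (by rw [hts]; exact List.mem_map_of_mem hp))
      · intro j hj
        have hjs : j < S.length := by omega
        have := hcnt j hjs
        rw [hcount, hcountb] at this
        have hb := (clamped_counts_iff ts j (by omega)).mpr (by rw [hcountb]; exact this)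
        rw [hcountb] at hb
        simpa [hlents] using hb
    · rintro ⟨hnn, hcnt⟩
      constructor
      · intro x hx
        rw [hmem, hts] at hx
        obtain ⟨p, hp, rfl⟩ := List.mem_map.mp hx
        exact hnn p hp
      · intro j hj
        have hjb : j < balloons.length := by omega
        have := hcnt j hjb
        have hb := (clamped_counts_iff ts j (by omega)).mp (by rw [hcountb]; simpa [hlents] using this)
        rw [hcountb] at hb
        rw [hcount, hcountb]
        exact hb

-- A's while loop and B's recursive bisection agree
theorem loop_eq (balloons : List (Int × Int)) (l r : Int) :
    shot_king_loop balloons l r = shot_king_alt_bisect balloons l r := by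
  by_cases h : 1 < r - l
  · rw [shot_king_loop, shot_king_alt_bisect]
    simp only [dif_pos h, dif_neg (by omega : ¬ r - l ≤ 1), ← check_eq, Int.add_comm l r]
    by_cases hc : shot_king_check balloons (PySem.Int.floordiv (r + l) 2) = true
    · rw [if_pos hc, if_pos hc]
      exact loop_eq balloons l (PySem.Int.floordiv (r + l) 2)
    · rw [if_neg hc, if_neg hc]
      exact loop_eq balloons (PySem.Int.floordiv (r + l) 2) r
  · rw [shot_king_loop, shot_king_alt_bisect, dif_neg h, dif_pos (by omega : r - l ≤ 1)]
termination_by (r - l).toNat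
decreasing_by
  · have := pv_mid_bounds h; omega
  · have := pv_mid_bounds h; omega

-- ===== VERDICT (by name: the statement is the Claim_ definition above) =====
theorem shot_king_spec : Claim_equal_shot_king := by
  intro N balloons _ _
  unfold Spec_shot_king shot_king shot_king_alt
  exact loop_eq balloons 0 _
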